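-- pv_equiv track=rewrite | github.com/ivangol739/reg | main.py | merge_contacts
-- ===== SOURCE A (Python) =====
-- def merge_contacts(contacts):
-- 	merged = {}
-- 	for contact in contacts:
-- 		name_key = (contact[0], contact[1])
-- 		if name_key not in merged:
-- 			merged[name_key] = contact
-- 		else:
-- 			for i in range(len(contact)):
-- 				if not merged[name_key][i]:
-- 					merged[name_key][i] = contact[i]
-- 	return list(merged.values())
-- ===== SOURCE B (Python) =====
-- def merge_contacts(contacts):
-- 	groups = {}
-- 	for contact in contacts:
-- 		groups.setdefault((contact[0], contact[1]), []).append(contact)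
-- 	result = []
-- 	for group in groups.values():
-- 		base = group[0]
-- 		result.append([next((g[i] for g in group if i < len(g) and g[i]), '')
-- 		               for i in range(len(base))])
-- 	return result
-- ===== Notes on version B (the rewrite author's own statement) =====
-- stated objective: alternative
-- what changed: B separates the work into two differently-shaped passes: one grouping pass collecting all contacts per name key, then a column-wise merge that builds each output record fresh by taking, for every field index, the first non-empty value in the group, instead of A's interleaved dict fold that repeatedly mutates the stored first record in place.
import Mathlib
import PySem

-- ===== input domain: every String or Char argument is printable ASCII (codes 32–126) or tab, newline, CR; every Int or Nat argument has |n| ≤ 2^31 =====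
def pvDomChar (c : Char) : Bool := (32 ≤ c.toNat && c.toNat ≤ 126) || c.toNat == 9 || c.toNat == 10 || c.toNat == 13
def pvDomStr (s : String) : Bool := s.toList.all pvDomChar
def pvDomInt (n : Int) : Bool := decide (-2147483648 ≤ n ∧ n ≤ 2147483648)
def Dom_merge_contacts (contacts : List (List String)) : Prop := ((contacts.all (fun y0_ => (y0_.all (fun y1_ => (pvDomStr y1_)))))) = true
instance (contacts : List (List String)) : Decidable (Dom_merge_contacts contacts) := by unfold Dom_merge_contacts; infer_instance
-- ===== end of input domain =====

-- B merges each group column-wise (first non-empty field wins) after a single grouping pass,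
-- instead of A's repeated in-place fill of the first record; return-value equivalence only
-- (Python A mutates the contact lists in place, Python B builds fresh lists).

-- ===== PORT A =====
-- A's dict `merged` : key (contact[0], contact[1]) → the (mutated) first contact of that key.
-- contact[0]/contact[1] read via pyGetD "" (Python raises IndexError on len < 2: outside Pre_);
-- the read merged[name_key][i] via pyGetD "" (Python raises when i ≥ len(base): outside Pre_).
def merge_contacts (contacts : List (List String)) : List (List String) :=
  (contacts.foldl
    (fun (merged : PySem.Dict (String × String) (List String)) contact =>
      let name_key := (PySem.List.pyGetD contact 0 "", PySem.List.pyGetD contact 1 "")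
      if merged.contains name_key = false then
        merged.insert name_key contact
      else
        merged.insert name_key
          ((PySem.List.pyRange 0 (contact.length : Int) 1).foldl
            (fun b i =>
              if PySem.List.pyGetD b i "" = "" then
                PySem.List.pySetD b i (PySem.List.pyGetD contact i "")
              else b)
            (merged.getD name_key [])))
    PySem.Dict.empty).values

-- ===== PORT B =====
-- B: one grouping pass (groups.setdefault(key, []).append(contact) = Dict.modify key [] (· ++ [contact])),
-- then for each group a column-wise merge: entry i is the first non-empty i-th field in the group.
def merge_contacts_alt (contacts : List (List String)) : List (List String) :=
  ((contacts.foldl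
      (fun (groups : PySem.Dict (String × String) (List (List String))) contact =>
        groups.modify (PySem.List.pyGetD contact 0 "", PySem.List.pyGetD contact 1 "") []
          (· ++ [contact]))
      PySem.Dict.empty).values).map
    (fun group =>
      let base := PySem.List.pyGetD group 0 []
      (PySem.List.pyRange 0 (base.length : Int) 1).map
        (fun i =>
          match group.find? (fun g => decide (i < (g.length : Int)) && (PySem.List.pyGetD g i "" != "")) with
          | some g => PySem.List.pyGetD g i ""
          | none => ""))

-- ===== PRECONDITION & SPEC =====
-- the name key (contact[0], contact[1]) of a record, with A's/B's out-of-range default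
def pvKeyOf (c : List String) : String × String := (c.getD 0 "", c.getD 1 "")

-- Pre_ excludes exactly the inputs on which Python A raises IndexError: a contact with fewer
-- than two fields (contact[1] fails), or a contact longer than the first contact sharing its
-- name key (the fill loop reads merged[name_key][i] past the end of the stored record).
def Pre_merge_contacts (contacts : List (List String)) : Prop :=
  (∀ c ∈ contacts, 2 ≤ c.length) ∧
  (∀ i ∈ List.range contacts.length, ∀ j ∈ List.range contacts.length, i < j →
    pvKeyOf (contacts.getD i []) = pvKeyOf (contacts.getD j []) →
    (∀ k ∈ List.range i, pvKeyOf (contacts.getD k []) ≠ pvKeyOf (contacts.getD i [])) →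
    (contacts.getD j []).length ≤ (contacts.getD i []).length)
instance (contacts : List (List String)) : Decidable (Pre_merge_contacts contacts) := by
  unfold Pre_merge_contacts; infer_instance

def pvWitness_merge_contacts : List (List String) :=
  [["alice", "smith", "", "1"], ["alice", "smith", "x", ""], ["bob", "a"]]

def Spec_merge_contacts (contacts : List (List String)) (out : List (List String)) : Prop :=
  out = merge_contacts_alt contacts
instance (contacts : List (List String)) (out : List (List String)) : Decidable (Spec_merge_contacts contacts out) := by
  unfold Spec_merge_contacts; infer_instance

-- ===== CLAIM (what is proved, stated in full; the proofs are below) =====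
def Claim_equal_merge_contacts : Prop := ∀ (contacts : List (List String)), Dom_merge_contacts contacts → Pre_merge_contacts contacts → Spec_merge_contacts contacts (merge_contacts contacts)

-- ===== LEMMAS AND PROOFS =====

-- one step of A's inner fill loop, over Nat indices
def pvStep (c b : List String) (j : Nat) : List String :=
  if b.getD j "" = "" then b.set j (c.getD j "") else b

-- A's inner fill loop, over Nat indices
def pvFill (b c : List String) : List String :=
  (List.range c.length).foldl (pvStep c) b

-- the merged record of one group, as A computes it
def pvMergeG (g : List (List String)) : List String :=
  match g with
  | [] => []
  | h :: t => t.foldl pvFill h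

-- A's dict fold, normalised
def pvFoldA (contacts : List (List String)) : PySem.Dict (String × String) (List String) :=
  contacts.foldl
    (fun m c => m.insert (pvKeyOf c)
      (if m.contains (pvKeyOf c) = true then pvFill (m.getD (pvKeyOf c) []) c else c))
    PySem.Dict.empty

-- B's grouping fold, normalised
def pvFoldB (contacts : List (List String)) : PySem.Dict (String × String) (List (List String)) :=
  contacts.foldl (fun d c => d.modify (pvKeyOf c) [] (· ++ [c])) PySem.Dict.empty

-- B's column merge of one group, over Nat indices
def pvFirst (t : List (List String)) (i : Nat) : String :=
  match t.find? (fun g => decide (i < g.length) && (g.getD i "" != "")) with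
  | some g => g.getD i ""
  | none => ""

def pvColMerge (group : List (List String)) : List String :=
  (List.range (group.getD 0 []).length).map (fun i => pvFirst group i)

lemma pyGetD_one (c : List String) : PySem.List.pyGetD c 1 "" = c.getD 1 "" := by
  have : ((1 : Nat) : Int) = (1 : Int) := rfl
  rw [← this, PySem.List.pyGetD_natCast]

lemma fillA_eq (b c : List String) :
    (PySem.List.pyRange 0 (c.length : Int) 1).foldl
      (fun b i => if PySem.List.pyGetD b i "" = "" then
          PySem.List.pySetD b i (PySem.List.pyGetD c i "") else b) b = pvFill b c := by
  rw [PySem.List.pyRange_one]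
  simp [List.foldl_map, pvFill, List.getD_eq_getElem?_getD]
  rfl

lemma merge_contacts_eq_foldA (contacts : List (List String)) :
    merge_contacts contacts = (pvFoldA contacts).values := by
  unfold merge_contacts pvFoldA
  congr 1
  congr 1
  funext m c
  simp only [PySem.List.pyGetD_zero, pyGetD_one, fillA_eq, pvKeyOf]
  cases hcb : m.contains (c.getD 0 "", c.getD 1 "") <;> simp

lemma merge_contacts_alt_eq (contacts : List (List String)) :
    merge_contacts_alt contacts = (pvFoldB contacts).values.map pvColMerge := by
  unfold merge_contacts_alt pvFoldB
  have h1 : (fun (groups : PySem.Dict (String × String) (List (List String))) contact =>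
      groups.modify (PySem.List.pyGetD contact 0 "", PySem.List.pyGetD contact 1 "") []
        (· ++ [contact])) = (fun d c => d.modify (pvKeyOf c) [] (· ++ [c])) := by
    funext d c
    simp [PySem.List.pyGetD_zero, pyGetD_one, pvKeyOf]
  rw [h1]
  congr 1
  funext group
  simp [PySem.List.pyGetD_zero, PySem.List.pyRange_one, List.map_map, pvColMerge, pvFirst,
    PySem.List.pyGetD_natCast, List.getD_eq_getElem?_getD]

-- ---- A's dict: keys and per-key value ----

lemma keys_foldA (xs : List (List String)) :
    (pvFoldA xs).keys = PySem.Set.ofList (xs.map pvKeyOf) := by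
  unfold pvFoldA
  rw [PySem.Dict.keys_foldl_insert_key]
  simp [PySem.Set.update_nil_left]

lemma nodup_keys_foldA (xs : List (List String)) : (pvFoldA xs).keys.Nodup := by
  unfold pvFoldA
  exact PySem.Dict.nodup_keys_foldl_insert_key _ _ _ _ PySem.Dict.nodup_keys_empty

lemma contains_foldA (xs : List (List String)) (k : String × String) :
    (pvFoldA xs).contains k = true ↔ ∃ a ∈ xs, pvKeyOf a = k := by
  rw [PySem.Dict.contains_iff_mem_keys, keys_foldA, PySem.Set.mem_ofList]
  simp [eq_comm]

lemma getD_foldA (xs : List (List String)) (k : String × String) :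
    (pvFoldA xs).getD k [] = pvMergeG (xs.filter (fun c => pvKeyOf c == k)) := by
  induction xs using List.reverseRecOn with
  | nil => simp [pvFoldA, pvMergeG, PySem.Dict.getD_empty]
  | append_singleton xs c ih =>
    have hstep : pvFoldA (xs ++ [c]) =
        (pvFoldA xs).insert (pvKeyOf c)
          (if (pvFoldA xs).contains (pvKeyOf c) = true then
            pvFill ((pvFoldA xs).getD (pvKeyOf c) []) c else c) := by
      unfold pvFoldA; rw [List.foldl_append]; rfl
    rw [hstep, List.filter_append]
    by_cases hk : pvKeyOf c = k
    · subst hk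
      rw [PySem.Dict.getD_insert_self]
      by_cases hc : (pvFoldA xs).contains (pvKeyOf c) = true
      · obtain ⟨a, ha, hak⟩ := (contains_foldA xs (pvKeyOf c)).mp hc
        have hne : xs.filter (fun c' => pvKeyOf c' == pvKeyOf c) ≠ [] := by
          intro hnil
          have : a ∈ xs.filter (fun c' => pvKeyOf c' == pvKeyOf c) :=
            List.mem_filter.mpr ⟨ha, by simp [hak]⟩
          simp [hnil] at this
        obtain ⟨h, t, hht⟩ := List.exists_cons_of_ne_nil hne
        simp only [hc, if_true, ih, hht, List.filter_cons, pvMergeG]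
        simp [List.foldl_append]
      · have hnil : xs.filter (fun c' => pvKeyOf c' == pvKeyOf c) = [] := by
          rw [List.filter_eq_nil_iff]
          intro a ha hbeq
          exact hc ((contains_foldA xs (pvKeyOf c)).mpr ⟨a, ha, by simpa using hbeq⟩)
        simp [hc, hnil, pvMergeG]
    · rw [PySem.Dict.getD_insert, if_neg (fun h => hk h.symm), ih]
      have : (List.filter (fun c' => pvKeyOf c' == k) [c]) = [] := by
        simp [hk]
      rw [this, List.append_nil]

lemma values_foldA (xs : List (List String)) :
    (pvFoldA xs).values =
      (PySem.Set.ofList (xs.map pvKeyOf)).map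
        (fun k => pvMergeG (xs.filter (fun c => pvKeyOf c == k))) := by
  rw [PySem.Dict.values_eq_map_keys _ (nodup_keys_foldA xs) [], keys_foldA]
  exact List.map_congr_left (fun k _ => getD_foldA xs k)

-- ---- B's dict: keys and per-key value ----

lemma keys_foldB (xs : List (List String)) :
    (pvFoldB xs).keys = PySem.Set.ofList (xs.map pvKeyOf) := by
  unfold pvFoldB
  rw [PySem.Dict.keys_foldl_modify_key]
  simp [PySem.Set.update_nil_left]

lemma nodup_keys_foldB (xs : List (List String)) : (pvFoldB xs).keys.Nodup := by
  unfold pvFoldB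
  exact PySem.Dict.nodup_keys_foldl_modify_key _ _ _ _ _ PySem.Dict.nodup_keys_empty

lemma getD_foldB (xs : List (List String)) (k : String × String) :
    (pvFoldB xs).getD k [] = xs.filter (fun c => pvKeyOf c == k) := by
  have h2 : pvFoldB xs = (xs.map (fun c => (pvKeyOf c, c))).foldl
      (fun (d : PySem.Dict (String × String) (List (List String))) p =>
        d.modify p.1 [] (· ++ [p.2])) PySem.Dict.empty := by
    unfold pvFoldB; rw [List.foldl_map]
  rw [h2, PySem.Dict.getD_foldl_modify_append]
  simp [PySem.Dict.getD_empty, List.filter_map, Function.comp_def]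

lemma values_foldB (xs : List (List String)) :
    (pvFoldB xs).values =
      (PySem.Set.ofList (xs.map pvKeyOf)).map
        (fun k => xs.filter (fun c => pvKeyOf c == k)) := by
  rw [PySem.Dict.values_eq_map_keys _ (nodup_keys_foldB xs) [], keys_foldB]
  exact List.map_congr_left (fun k _ => getD_foldB xs k)

-- ---- elementwise description of the fill loops ----

lemma length_foldl_pvStep (c : List String) (l : List Nat) :
    ∀ b : List String, (l.foldl (pvStep c) b).length = b.length := by
  induction l with
  | nil => intro b; rfl
  | cons j l ih =>
    intro b
    rw [List.foldl_cons, ih]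
    unfold pvStep
    split <;> simp

lemma length_pvFill (b c : List String) : (pvFill b c).length = b.length :=
  length_foldl_pvStep c _ b

lemma length_foldl_pvFill (t : List (List String)) :
    ∀ h : List String, (t.foldl pvFill h).length = h.length := by
  induction t with
  | nil => intro h; rfl
  | cons g t ih => intro h; rw [List.foldl_cons, ih, length_pvFill]

lemma getD_rangeFill (u : List String) (n : Nat) :
    ∀ (b : List String) (i : Nat), i < b.length →
      ((List.range n).foldl (pvStep u) b)[i]?.getD "" =
        if i < n ∧ b[i]?.getD "" = "" ∧ i < u.length then (u[i]?.getD "") else (b[i]?.getD "") := by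
  induction n with
  | zero => intro b i _; simp
  | succ n ih =>
    intro b i hi
    rw [List.range_succ, List.foldl_append, List.foldl_cons, List.foldl_nil]
    have hBlen : ((List.range n).foldl (pvStep u) b).length = b.length :=
      length_foldl_pvStep u _ b
    rw [pvStep]
    simp only [List.getD_eq_getElem?_getD]
    by_cases hin : i = n
    · subst hin
      have hBi : ((List.range i).foldl (pvStep u) b)[i]?.getD "" = b[i]?.getD "" := by
        rw [ih b i hi]; simp
      rw [hBi]
      by_cases hb : b[i]?.getD "" = ""
      · rw [if_pos hb]
        have hiB : i < ((List.range i).foldl (pvStep u) b).length := by omega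
        by_cases hic : i < u.length
        · simp [List.getElem?_set_self', List.getElem?_eq_getElem hiB, hb, hic]
        · have hc : u[i]? = none := List.getElem?_eq_none (by omega)
          simp [List.getElem?_set_self', List.getElem?_eq_getElem hiB, hb, hic]
      · rw [if_neg hb, ih b i hi]
        simp [hb]
    · have hset : ∀ v : String,
          ((((List.range n).foldl (pvStep u) b).set n v))[i]? =
            ((List.range n).foldl (pvStep u) b)[i]? := by
        intro v; exact List.getElem?_set_ne (by omega)
      have hiff : (i < n + 1) ↔ (i < n) := by omega
      split
      · rw [hset, ih b i hi]
        simp only [hiff]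
      · rw [ih b i hi]
        simp only [hiff]

lemma getD_pvFill (b u : List String) (i : Nat) (hi : i < b.length) :
    (pvFill b u)[i]?.getD "" =
      if b[i]?.getD "" = "" ∧ i < u.length then (u[i]?.getD "") else (b[i]?.getD "") := by
  unfold pvFill
  rw [getD_rangeFill u u.length b i hi]
  by_cases h1 : b[i]?.getD "" = ""
  · by_cases h2 : i < u.length
    · simp [h1, h2]
    · have hc : u[i]? = none := List.getElem?_eq_none (by omega)
      simp [h1, h2]
  · simp [h1]

lemma getD_foldl_pvFill (t : List (List String)) :
    ∀ (h : List String) (i : Nat), i < h.length →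
      (t.foldl pvFill h)[i]?.getD "" =
        if h[i]?.getD "" ≠ "" then (h[i]?.getD "") else pvFirst t i := by
  induction t with
  | nil => intro h i _; simp [pvFirst]
  | cons g t ih =>
    intro h i hi
    rw [List.foldl_cons, ih (pvFill h g) i (by rw [length_pvFill]; exact hi),
      getD_pvFill h g i hi]
    unfold pvFirst
    rw [List.find?_cons]
    by_cases hh : h[i]?.getD "" = ""
    · by_cases hgl : i < g.length
      · have hgi : g[i]? = some (g[i]'hgl) := List.getElem?_eq_getElem hgl
        by_cases hg : g[i]'hgl = ""
        · simp [hh, hgi, hg]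
        · have hb2 : ((g[i]'hgl) != "") = true := by simp [hg]
          simp [hh, hgi, hg, hgl, hb2, List.getD_eq_getElem?_getD]
      · have hc : g[i]? = none := List.getElem?_eq_none (by omega)
        have hp : (decide (i < g.length) && (g.getD i "" != "")) = false := by
          simp [hgl]
        simp [hp, hh, hc]
    · simp [hh]

lemma colMerge_eq_mergeG (h : List String) (t : List (List String)) :
    pvMergeG (h :: t) = pvColMerge (h :: t) := by
  show t.foldl pvFill h = pvColMerge (h :: t)
  unfold pvColMerge
  have hbase : (h :: t).getD 0 [] = h := rfl
  rw [hbase]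
  apply List.ext_getElem
  · simp [length_foldl_pvFill t h]
  · intro i h1 h2
    have hi : i < h.length := by rw [length_foldl_pvFill t h] at h1; exact h1
    have hL : (t.foldl pvFill h)[i] = (t.foldl pvFill h)[i]?.getD "" := by
      rw [List.getElem?_eq_getElem h1]; rfl
    rw [hL, getD_foldl_pvFill t h i hi, List.getElem_map, List.getElem_range]
    unfold pvFirst
    rw [List.find?_cons]
    have hp : (decide (i < h.length) && (h.getD i "" != "")) = (h.getD i "" != "") := by
      simp [hi]
    rw [hp]
    by_cases hh : h[i]?.getD "" = ""
    · have hb : (h[i]?.getD "" != "") = false := by simp [hh]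
      simp [hb, hh]
    · have hb : (h[i]?.getD "" != "") = true := by simp [hh]
      simp [hb, hh]

theorem merge_contacts_eqv (contacts : List (List String)) :
    merge_contacts contacts = merge_contacts_alt contacts := by
  rw [merge_contacts_eq_foldA, merge_contacts_alt_eq, values_foldA, values_foldB, List.map_map]
  apply List.map_congr_left
  intro k hk
  have hk' : ∃ a ∈ contacts, pvKeyOf a = k := by
    rw [PySem.Set.mem_ofList] at hk
    simpa [eq_comm] using hk
  obtain ⟨a, ha, hak⟩ := hk'
  have hne : contacts.filter (fun c => pvKeyOf c == k) ≠ [] := by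
    intro hnil
    have : a ∈ contacts.filter (fun c => pvKeyOf c == k) :=
      List.mem_filter.mpr ⟨ha, by simp [hak]⟩
    simp [hnil] at this
  obtain ⟨h, t, hht⟩ := List.exists_cons_of_ne_nil hne
  simp only [Function.comp_def, hht]
  exact colMerge_eq_mergeG h t

-- ===== VERDICT (by name: the statement is the Claim_ definition above) =====
theorem merge_contacts_spec : Claim_equal_merge_contacts := by
  intro contacts _ _
  unfold Spec_merge_contacts
  exact merge_contacts_eqv contacts
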